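-- pv_equiv track=rewrite | github.com/GustavoSantosBr/coursera-python | FirstPart/Week4/Additional/PrintAdjacentNumber.py | has_adjacent_number
-- ===== SOURCE A (Python) =====
-- def has_adjacent_number(number: int) -> bool:
--     is_equal_number = False
--     divided_number = number % 10
--     number = number // 10
--
--     while number > 0 and not is_equal_number:
--         current_divided_number = number % 10
--         number = number // 10
--
--         if current_divided_number == divided_number:
--             is_equal_number = True
--         divided_number = current_divided_number
--     return is_equal_number
-- ===== SOURCE B (Python) =====
-- def has_adjacent_number(number: int) -> bool:
--     # Negative inputs never enter A's loop, so they never report adjacency.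
--     if number < 0:
--         return False
--     s = str(number)
--     return any(s[i] == s[i + 1] for i in range(len(s) - 1))
-- ===== Notes on version B (the rewrite author's own statement) =====
-- stated objective: idiomatic
-- what changed: Replaces the arithmetic digit-extraction while-loop (repeated %10 and //10 with a carried previous-digit state flag) by converting the number to its decimal string once and scanning adjacent character pairs by index; negatives, on which A's loop never runs and always yields False, are handled by one guard.
import Mathlib
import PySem

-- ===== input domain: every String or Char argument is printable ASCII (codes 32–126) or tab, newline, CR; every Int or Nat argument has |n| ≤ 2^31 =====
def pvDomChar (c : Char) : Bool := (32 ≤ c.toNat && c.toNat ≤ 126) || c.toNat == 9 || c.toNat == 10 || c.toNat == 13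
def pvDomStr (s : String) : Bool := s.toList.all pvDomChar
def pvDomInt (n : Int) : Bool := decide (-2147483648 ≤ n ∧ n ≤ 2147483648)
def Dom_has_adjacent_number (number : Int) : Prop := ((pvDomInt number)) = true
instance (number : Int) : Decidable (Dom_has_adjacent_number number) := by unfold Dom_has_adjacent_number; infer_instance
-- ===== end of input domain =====

-- B converts the number to its decimal string once and scans adjacent character
-- pairs by index, instead of A's arithmetic digit-extraction loop (%10, //10).


-- ===== PORT A =====
-- the while-loop: state (number, divided_number, is_equal_number)
def pvLoopA (number divided : Int) (isEq : Bool) : Bool :=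
  if h : 0 < number ∧ isEq = false then
    let cur := PySem.Int.mod number 10
    pvLoopA (PySem.Int.floordiv number 10) cur (if cur = divided then true else isEq)
  else isEq
termination_by number.toNat
decreasing_by
  have h1 := h.1
  have h2 : PySem.Int.floordiv number 10 < number :=
    (PySem.Int.floordiv_lt_iff_lt_mul (by norm_num)).2 (by nlinarith)
  omega

def has_adjacent_number (number : Int) : Bool :=
  pvLoopA (PySem.Int.floordiv number 10) (PySem.Int.mod number 10) false

-- ===== PORT B =====
def has_adjacent_number_alt (number : Int) : Bool :=
  if number < 0 then false
  else
    let s := PySem.Int.toStr number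
    (PySem.List.pyRange 0 (PySem.Str.len s - 1) 1).any
      (fun i => PySem.Str.pyGet? s i == PySem.Str.pyGet? s (i + 1))

-- ===== PRECONDITION & SPEC =====
def Spec_has_adjacent_number (number : Int) (out : Bool) : Prop := out = has_adjacent_number_alt number
instance (number : Int) (out : Bool) : Decidable (Spec_has_adjacent_number number out) := by unfold Spec_has_adjacent_number; infer_instance

-- ===== CLAIM (what is proved, stated in full; the proofs are below) =====
def Claim_equal_has_adjacent_number : Prop := ∀ (number : Int), Dom_has_adjacent_number number → Spec_has_adjacent_number number (has_adjacent_number number)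

-- ===== LEMMAS AND PROOFS =====

/-- "some two adjacent elements are equal" -/
def pvHasAdj {α : Type} [DecidableEq α] : List α → Bool
  | a :: b :: t => decide (a = b) || pvHasAdj (b :: t)
  | _ => false

theorem pvLoopA_true (n d : Int) : pvLoopA n d true = true := by
  rw [pvLoopA]; simp

theorem pvLoopA_eq (m : Nat) : ∀ d : Int,
    pvLoopA (m : Int) d false = pvHasAdj (d :: (Nat.digits 10 m).map (fun k : Nat => (k : Int))) := by
  induction m using Nat.strong_induction_on with
  | _ m ih =>
    intro d
    rcases Nat.eq_zero_or_pos m with hm | hm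
    · subst hm
      rw [pvLoopA]
      simp [pvHasAdj]
    · have hpos : (0 : Int) < (m : Int) := by exact_mod_cast hm
      have hmod : PySem.Int.mod (m : Int) 10 = ((m % 10 : Nat) : Int) := by
        exact_mod_cast PySem.Int.mod_natCast m 10
      have hdiv : PySem.Int.floordiv (m : Int) 10 = ((m / 10 : Nat) : Int) := by
        exact_mod_cast PySem.Int.floordiv_natCast m 10
      rw [pvLoopA, dif_pos ⟨hpos, rfl⟩, hmod, hdiv, Nat.digits_def' (by norm_num) hm]
      by_cases hc : ((m % 10 : Nat) : Int) = d
      · subst hc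
        simp [pvLoopA_true, pvHasAdj]
      · simp only [if_neg hc]
        rw [ih (m / 10) (Nat.div_lt_self hm (by norm_num))]
        simp only [List.map_cons, pvHasAdj]
        rw [decide_eq_false (fun h : d = ((m % 10 : Nat) : Int) => hc h.symm), Bool.false_or]

theorem pvA_eq (m : Nat) :
    has_adjacent_number (m : Int) = pvHasAdj ((Nat.digits 10 m).map (fun k : Nat => (k : Int))) := by
  unfold has_adjacent_number
  have hmod : PySem.Int.mod (m : Int) 10 = ((m % 10 : Nat) : Int) := by
    exact_mod_cast PySem.Int.mod_natCast m 10
  have hdiv : PySem.Int.floordiv (m : Int) 10 = ((m / 10 : Nat) : Int) := by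
    exact_mod_cast PySem.Int.floordiv_natCast m 10
  rw [hmod, hdiv, pvLoopA_eq]
  rcases Nat.eq_zero_or_pos m with hm | hm
  · subst hm; simp [pvHasAdj]
  · rw [Nat.digits_def' (by norm_num) hm]
    simp

theorem pvHasAdj_head {α : Type} [DecidableEq α] (a : α) (l : List α) :
    pvHasAdj (a :: l) = (pvHasAdj l || decide (l.head? = some a)) := by
  cases l with
  | nil => simp [pvHasAdj]
  | cons b t =>
    simp only [pvHasAdj, List.head?_cons, Option.some.injEq]
    rw [Bool.or_comm]
    congr 1
    simp [eq_comm]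

theorem pvHasAdj_append_singleton {α : Type} [DecidableEq α] (l : List α) (x : α) :
    pvHasAdj (l ++ [x]) = (pvHasAdj l || decide (l.getLast? = some x)) := by
  induction l with
  | nil => simp [pvHasAdj]
  | cons a l ih =>
    cases l with
    | nil => simp [pvHasAdj]
    | cons b t =>
      simp only [List.cons_append, pvHasAdj, List.getLast?_cons_cons] at *
      rw [ih, Bool.or_assoc]

theorem pvHasAdj_reverse {α : Type} [DecidableEq α] (l : List α) :
    pvHasAdj l.reverse = pvHasAdj l := by
  induction l with
  | nil => rfl
  | cons a l ih =>
    rw [List.reverse_cons, pvHasAdj_append_singleton, ih, List.getLast?_reverse,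
      pvHasAdj_head]

theorem pvHasAdj_map {α β : Type} [DecidableEq α] [DecidableEq β] (f : α → β) (l : List α)
    (hf : ∀ a ∈ l, ∀ b ∈ l, f a = f b → a = b) : pvHasAdj (l.map f) = pvHasAdj l := by
  induction l with
  | nil => rfl
  | cons a l ih =>
    cases l with
    | nil => rfl
    | cons b t =>
      simp only [List.map_cons, pvHasAdj]
      have h1 : decide (f a = f b) = decide (a = b) := by
        by_cases h : a = b
        · simp [h]
        · have hne : ¬ f a = f b := fun hfe => h (hf a (by simp) b (by simp) hfe)
          simp [h, hne]
      rw [h1]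
      have := ih (fun x hx y hy => hf x (List.mem_cons_of_mem _ hx) y (List.mem_cons_of_mem _ hy))
      simp only [List.map_cons] at this
      rw [this]

theorem pvToDigitsCore_eq (fuel : Nat) : ∀ n : Nat, ∀ ds : List Char, 0 < n → n < fuel →
    Nat.toDigitsCore 10 fuel n ds = ((Nat.digits 10 n).map Nat.digitChar).reverse ++ ds := by
  induction fuel with
  | zero => intro n ds hn hf; omega
  | succ f ih =>
    intro n ds hn hf
    show (if n / 10 = 0 then (n % 10).digitChar :: ds
        else Nat.toDigitsCore 10 f (n / 10) ((n % 10).digitChar :: ds)) = _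
    rw [Nat.digits_def' (by norm_num) hn]
    by_cases h : n / 10 = 0
    · rw [if_pos h, h]
      simp
    · rw [if_neg h,
        ih (n / 10) _ (Nat.pos_of_ne_zero h)
          (by have := Nat.div_lt_self hn (show 1 < 10 by norm_num); omega)]
      simp

theorem pvToDigits_eq (n : Nat) (hn : 0 < n) :
    Nat.toDigits 10 n = ((Nat.digits 10 n).map Nat.digitChar).reverse := by
  rw [Nat.toDigits, pvToDigitsCore_eq (n + 1) n [] hn (by omega), List.append_nil]

theorem pvDigitChar_inj (a b : Nat) (ha : a < 10) (hb : b < 10)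
    (h : Nat.digitChar a = Nat.digitChar b) : a = b := by
  have key : ∀ x : Fin 10, ∀ y : Fin 10, Nat.digitChar x = Nat.digitChar y → x = y := by decide
  have := key ⟨a, ha⟩ ⟨b, hb⟩ h
  exact congrArg Fin.val this

theorem pvAnyRange (cs : List Char) :
    (List.range (cs.length - 1)).any (fun k => cs[k]? == cs[k + 1]?) = pvHasAdj cs := by
  induction cs with
  | nil => rfl
  | cons a cs ih =>
    cases cs with
    | nil => rfl
    | cons b t =>
      have hlen : (a :: b :: t).length - 1 = t.length + 1 := by simp
      rw [hlen, List.range_succ_eq_map, List.any_cons, List.any_map]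
      have hhead : ((a :: b :: t)[0]? == (a :: b :: t)[1]?) = decide (a = b) := by
        by_cases h : a = b <;> simp [h]
      rw [hhead]
      have htail : ((fun k => (a :: b :: t)[k]? == (a :: b :: t)[k + 1]?) ∘ Nat.succ) =
          (fun k => (b :: t)[k]? == (b :: t)[k + 1]?) := by
        funext k; rfl
      rw [htail, show t.length = (b :: t).length - 1 from rfl, ih]
      rfl

theorem pvAny_eq (cs : List Char) :
    (PySem.List.pyRange 0 ((cs.length : Int) - 1) 1).any
      (fun i => PySem.List.pyGet? cs i == PySem.List.pyGet? cs (i + 1)) = pvHasAdj cs := by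
  rw [PySem.List.pyRange_one, List.any_map]
  have h1 : ((cs.length : Int) - 1 - 0).toNat = cs.length - 1 := by omega
  rw [h1]
  have hfun : ((fun i : Int => PySem.List.pyGet? cs i == PySem.List.pyGet? cs (i + 1)) ∘
      (fun k : Nat => (0 : Int) + (k : Int))) = (fun k : Nat => cs[k]? == cs[k + 1]?) := by
    funext k
    have e1 : (0 : Int) + (k : Int) = ((k : Nat) : Int) := by omega
    have e2 : (k : Int) + 1 = (((k + 1 : Nat)) : Int) := by push_cast; ring
    simp only [Function.comp_apply, e1, e2, PySem.List.pyGet?_natCast]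
  rw [hfun, pvAnyRange]

-- ===== VERDICT (by name: the statement is the Claim_ definition above) =====
theorem has_adjacent_number_spec : Claim_equal_has_adjacent_number := by
  unfold Claim_equal_has_adjacent_number Spec_has_adjacent_number
  intro number _
  by_cases hneg : number < 0
  · unfold has_adjacent_number has_adjacent_number_alt
    rw [if_pos hneg, pvLoopA]
    have hd : PySem.Int.floordiv number 10 < 0 :=
      (PySem.Int.floordiv_lt_iff_lt_mul (by norm_num)).2 (by omega)
    rw [dif_neg (by simp; omega)]
  · rw [Int.not_lt] at hneg
    obtain ⟨m, rfl⟩ := Int.eq_ofNat_of_zero_le hneg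
    rw [pvA_eq]
    unfold has_adjacent_number_alt
    rw [if_neg (by omega)]
    have hs : ∀ i : Int, PySem.Str.pyGet? (PySem.Int.toStr (m : Int)) i =
        PySem.List.pyGet? (Nat.toDigits 10 m) i := by
      intro i
      rw [PySem.Str.pyGet?, PySem.Chars.pyGet?, PySem.Int.toList_toStr]
      simp [PySem.Int.toChars, show ¬ ((m : Int) < 0) by omega]
    have hlen : PySem.Str.len (PySem.Int.toStr (m : Int)) = ((Nat.toDigits 10 m).length : Int) := by
      rw [PySem.Str.len, PySem.Int.toList_toStr]
      simp [PySem.Int.toChars, show ¬ ((m : Int) < 0) by omega]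
    simp only [hs, hlen, pvAny_eq]
    rcases Nat.eq_zero_or_pos m with hm | hm
    · subst hm; simp [pvHasAdj]
    · rw [pvToDigits_eq m hm, pvHasAdj_reverse,
        pvHasAdj_map Nat.digitChar _ (fun a haa b hbb h => pvDigitChar_inj a b
          (Nat.digits_lt_base (by norm_num) haa) (Nat.digits_lt_base (by norm_num) hbb) h),
        pvHasAdj_map (fun k : Nat => (k : Int)) _ (fun a _ b _ h => Int.natCast_inj.mp (by simpa using h))]
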